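-- pv_equiv track=rewrite | github.com/armanheydari/Modeling-Algorithms-Biological-Systems_Fall-2023- | Assignment1/Q1.py | is_rearrange_possible
-- ===== SOURCE A (Python) =====
-- from itertools import combinations, product
--
-- def reverse_operation(pi, i, j):
--     """
--     This method does the reverse operation that we need on a list.
--     :List pi: The list that we want to do the operation on.
--     :Int i: First boundary of the reverse.
--     :Int j: Second boundary of the reverse.
--     :return: The new list after reversal.
--     """
--     if j < i:
--         i, j = j, i
--     temp1 = pi[:i]
--     temp2 = pi[i:j+1]
--     temp2.reverse()
--     temp3 = pi[j+1:]
--     return temp1 + temp2 + temp3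
--
-- def is_rearrange_possible(pi, identity, m, all_combinations):
--     """
--     This method is the core of the brute force. As we check is it
--     possible to rearrange pi with m reverse operations such that
--     it turns to the identity.
--     :List pi: the inputted permutation.
--     :List identity: the identity which is a list from 1 to n.
--     :Int m: number of reverse operations.
--     :list all_combinations: all possible tuples of reverse gathered in a list.
--     :return: a boolean shows is it possible or not.
--     """
--     # Create every possible sequence of m reverse operations
--     m_combinations = list(product(all_combinations, repeat=m))
--
--     # Operate each of the sequences to see if the result is the identity
--     for combination in m_combinations:
--         temp = pi.copy()
--
--         for i, j in combination:
--             temp = reverse_operation(temp, i, j)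
--         if temp == identity:
--             return True
--
--     # If nothing resulted in identity means we need higher m
--     return False
-- ===== SOURCE B (Python) =====
-- def is_rearrange_possible(pi, identity, m, all_combinations):
--     """Level-by-level BFS over the DISTINCT permutations reachable with exactly
--     k reversals; answers whether the identity is reachable in exactly m."""
--     frontier = {tuple(pi)}
--     for _ in range(m):
--         frontier = {_reversed_segment(t, i, j)
--                     for t in frontier for (i, j) in all_combinations}
--     return tuple(identity) in frontier
--
--
-- def _reversed_segment(t, i, j):
--     if j < i:
--         i, j = j, i
--     return t[:i] + t[i:j + 1][::-1] + t[j + 1:]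
-- ===== Notes on version B (the rewrite author's own statement) =====
-- stated objective: faster
-- what changed: A enumerates all B^m sequences of reversals via itertools.product and replays each from scratch; B does a level-by-level BFS keeping only the set of distinct permutations reachable after k reversals, so the work per level is bounded by the number of distinct states instead of B^k.
import Mathlib
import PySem

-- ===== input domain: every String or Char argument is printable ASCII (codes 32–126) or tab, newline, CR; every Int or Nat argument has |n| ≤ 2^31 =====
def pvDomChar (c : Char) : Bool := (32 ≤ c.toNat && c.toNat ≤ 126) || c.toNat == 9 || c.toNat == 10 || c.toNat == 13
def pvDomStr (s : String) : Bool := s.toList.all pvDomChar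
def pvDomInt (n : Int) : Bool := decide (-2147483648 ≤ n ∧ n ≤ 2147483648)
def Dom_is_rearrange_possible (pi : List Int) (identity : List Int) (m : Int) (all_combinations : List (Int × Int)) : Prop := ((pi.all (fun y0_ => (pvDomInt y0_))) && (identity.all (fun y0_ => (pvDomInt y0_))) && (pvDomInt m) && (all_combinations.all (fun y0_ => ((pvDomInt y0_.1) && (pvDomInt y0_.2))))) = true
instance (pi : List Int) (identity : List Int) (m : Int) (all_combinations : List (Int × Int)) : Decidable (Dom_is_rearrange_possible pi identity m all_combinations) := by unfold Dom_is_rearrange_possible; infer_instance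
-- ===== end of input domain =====

-- B replaces A's enumeration of all B^m sequences of reversals by a level-by-level
-- BFS over the distinct permutations reachable with exactly k reversals (faster: asymptotic,
-- measured).

-- ===== PORT A =====
def reverse_operation (pi : List Int) (i j : Int) : List Int :=
  let ij := if j < i then (j, i) else (i, j)
  let temp1 := PySem.List.slice pi none (some ij.1)
  let temp2 := (PySem.List.slice pi (some ij.1) (some (ij.2 + 1))).reverse
  let temp3 := PySem.List.slice pi (some (ij.2 + 1)) none
  temp1 ++ temp2 ++ temp3

-- itertools.product(all_combinations, repeat=m) as a list, in product order
def prodRepeat (xs : List (Int × Int)) : Nat → List (List (Int × Int))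
  | 0 => [[]]
  | k + 1 => xs.flatMap (fun x => (prodRepeat xs k).map (fun c => x :: c))

def is_rearrange_possible (pi : List Int) (identity : List Int) (m : Int) (all_combinations : List (Int × Int)) : Bool :=
  let m_combinations := prodRepeat all_combinations m.toNat
  m_combinations.any (fun combination =>
    (combination.foldl (fun temp ij => reverse_operation temp ij.1 ij.2) pi) == identity)

-- ===== PORT B =====
def revSeg (t : List Int) (i j : Int) : List Int :=
  let ij := if j < i then (j, i) else (i, j)
  PySem.List.slice t none (some ij.1)
    ++ (PySem.List.slice t (some ij.1) (some (ij.2 + 1))).reverse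
    ++ PySem.List.slice t (some (ij.2 + 1)) none

-- one BFS level: the set comprehension {revSeg t i j for t in frontier for (i,j) in all_combinations}
def bfsStep (all_combinations : List (Int × Int)) (frontier : PySem.Set (List Int)) : PySem.Set (List Int) :=
  PySem.Set.ofList (frontier.flatMap (fun t => all_combinations.map (fun c => revSeg t c.1 c.2)))

def bfsLevels (all_combinations : List (Int × Int)) : Nat → PySem.Set (List Int) → PySem.Set (List Int)
  | 0, frontier => frontier
  | k + 1, frontier => bfsLevels all_combinations k (bfsStep all_combinations frontier)

def is_rearrange_possible_alt (pi : List Int) (identity : List Int) (m : Int) (all_combinations : List (Int × Int)) : Bool :=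
  PySem.Set.contains (bfsLevels all_combinations m.toNat (PySem.Set.ofList [pi])) identity

-- ===== PRECONDITION & SPEC =====
-- Pre_ excludes m < 0, where Python's product(..., repeat=m) raises ValueError.
def Pre_is_rearrange_possible (pi : List Int) (identity : List Int) (m : Int) (all_combinations : List (Int × Int)) : Prop := 0 ≤ m
instance (pi : List Int) (identity : List Int) (m : Int) (all_combinations : List (Int × Int)) : Decidable (Pre_is_rearrange_possible pi identity m all_combinations) := by unfold Pre_is_rearrange_possible; infer_instance

def pvWitness_is_rearrange_possible : List Int × List Int × Int × (List (Int × Int)) := ([2, 1], [1, 2], 1, [(0, 1)])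

def Spec_is_rearrange_possible (pi : List Int) (identity : List Int) (m : Int) (all_combinations : List (Int × Int)) (out : Bool) : Prop := out = is_rearrange_possible_alt pi identity m all_combinations
instance (pi : List Int) (identity : List Int) (m : Int) (all_combinations : List (Int × Int)) (out : Bool) : Decidable (Spec_is_rearrange_possible pi identity m all_combinations out) := by unfold Spec_is_rearrange_possible; infer_instance

-- ===== CLAIM (what is proved, stated in full; the proofs are below) =====
def Claim_equal_is_rearrange_possible : Prop := ∀ (pi : List Int) (identity : List Int) (m : Int) (all_combinations : List (Int × Int)), Dom_is_rearrange_possible pi identity m all_combinations → Pre_is_rearrange_possible pi identity m all_combinations → Spec_is_rearrange_possible pi identity m all_combinations (is_rearrange_possible pi identity m all_combinations)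

-- ===== LEMMAS AND PROOFS =====
theorem revSeg_eq (t : List Int) (i j : Int) : revSeg t i j = reverse_operation t i j := rfl

theorem mem_bfsLevels (all_combinations : List (Int × Int)) (k : Nat)
    (frontier : PySem.Set (List Int)) (x : List Int) :
    x ∈ bfsLevels all_combinations k frontier ↔
      ∃ t ∈ frontier, ∃ comb ∈ prodRepeat all_combinations k,
        comb.foldl (fun temp ij => reverse_operation temp ij.1 ij.2) t = x := by
  induction k generalizing frontier with
  | zero =>
    simp [bfsLevels, prodRepeat]
  | succ k ih =>
    rw [bfsLevels, ih]
    constructor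
    · rintro ⟨t', ht', comb, hcomb, rfl⟩
      rw [bfsStep, PySem.Set.mem_ofList, List.mem_flatMap] at ht'
      obtain ⟨t, ht, ht'⟩ := ht'
      rw [List.mem_map] at ht'
      obtain ⟨c, hc, rfl⟩ := ht'
      refine ⟨t, ht, c :: comb, ?_, by simp [List.foldl_cons, revSeg_eq]⟩
      simp only [prodRepeat, List.mem_flatMap, List.mem_map]
      exact ⟨c, hc, comb, hcomb, rfl⟩
    · rintro ⟨t, ht, comb, hcomb, rfl⟩
      simp only [prodRepeat, List.mem_flatMap, List.mem_map] at hcomb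
      obtain ⟨c, hc, rest, hrest, rfl⟩ := hcomb
      refine ⟨revSeg t c.1 c.2, ?_, rest, hrest, by simp [List.foldl_cons, revSeg_eq]⟩
      rw [bfsStep, PySem.Set.mem_ofList, List.mem_flatMap]
      exact ⟨t, ht, List.mem_map.2 ⟨c, hc, rfl⟩⟩

-- ===== VERDICT (by name: the statement is the Claim_ definition above) =====
theorem is_rearrange_possible_spec : Claim_equal_is_rearrange_possible := by
  intro pi identity m all_combinations _ _
  unfold Spec_is_rearrange_possible
  rw [Bool.eq_iff_iff]
  unfold is_rearrange_possible is_rearrange_possible_alt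
  rw [List.any_eq_true, PySem.Set.contains_iff, mem_bfsLevels]
  constructor
  · rintro ⟨comb, hcomb, h⟩
    exact ⟨pi, by simp [PySem.Set.mem_ofList], comb, hcomb, beq_iff_eq.1 h⟩
  · rintro ⟨t, ht, comb, hcomb, h⟩
    rw [PySem.Set.mem_ofList, List.mem_singleton] at ht
    subst ht
    exact ⟨comb, hcomb, beq_iff_eq.2 h⟩
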